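-- pv_equiv track=rewrite | github.com/bliscosque/PythonCompetenceDevelopment | udemy_DSA_python/S43-DP/3-numberFactor.py | numberFactor
-- ===== SOURCE A (Python) =====
-- def numberFactor(n,dp):
--     if n in (0,1,2): return 1
--     elif n==3: return 2
--     elif n in dp: return dp[n]
--     else:
--         subp1=numberFactor(n-1, dp)
--         subp2=numberFactor(n-3, dp)
--         subp3=numberFactor(n-4, dp)
--         dp[n]=subp1+subp2+subp3
--         return dp[n]
-- ===== SOURCE B (Python) =====
-- # Bottom-up iterative DP over the same recurrence; return value equals A's.
-- # Note: both fill dp in place; B fills every missing key 4..n while A skips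
-- # subtrees cut off by memo hits, so the mutation sets can differ slightly.
-- def numberFactor(n, dp):
--     if n in (0, 1, 2): return 1
--     if n == 3: return 2
--     if n in dp: return dp[n]
--     vals = [1, 1, 1, 2] + [0] * (n - 3)
--     for i in range(4, n + 1):
--         if i in dp:
--             vals[i] = dp[i]
--         else:
--             vals[i] = vals[i - 1] + vals[i - 3] + vals[i - 4]
--             dp[i] = vals[i]
--     return vals[n]
-- ===== Notes on version B (the rewrite author's own statement) =====
-- stated objective: alternative
-- what changed: Replaces the top-down memoized recursion with a bottom-up iterative DP that fills an array of values for 4..n, consulting pre-seeded dp entries exactly as A does.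
-- outside the precondition, e.g. on numberFactor(-2, {}): A does not finish within the time limit, B returns 1
import Mathlib
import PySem

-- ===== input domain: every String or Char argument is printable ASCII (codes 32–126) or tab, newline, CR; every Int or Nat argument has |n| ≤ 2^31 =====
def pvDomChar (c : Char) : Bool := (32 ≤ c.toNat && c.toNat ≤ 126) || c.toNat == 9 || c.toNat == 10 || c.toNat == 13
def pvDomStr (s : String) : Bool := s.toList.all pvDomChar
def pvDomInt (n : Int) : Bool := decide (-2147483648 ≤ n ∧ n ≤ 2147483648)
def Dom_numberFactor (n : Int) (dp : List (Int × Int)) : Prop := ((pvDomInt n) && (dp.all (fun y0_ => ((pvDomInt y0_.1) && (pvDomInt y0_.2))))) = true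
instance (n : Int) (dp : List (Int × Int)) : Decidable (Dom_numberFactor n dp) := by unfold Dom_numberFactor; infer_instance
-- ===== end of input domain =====

-- B is a bottom-up iterative DP over the same recurrence; equivalence is about the
-- RETURN value only: both mutate dp in place, but B fills every missing key 4..n
-- while A skips subtrees its memo hits cut off.

-- ===== PORT A =====
-- top-down memoized recursion; fuel makes the recursion total (n.toNat + 1 levels
-- suffice for every input Pre_ admits)
def numberFactorGoA (fuel : Nat) (n : Int) (d : PySem.Dict Int Int) : Int × PySem.Dict Int Int :=
  match fuel with
  | 0 => (0, d)
  | fuel + 1 =>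
    if n = 0 ∨ n = 1 ∨ n = 2 then (1, d)
    else if n = 3 then (2, d)
    else
      match d.get? n with
      | some v => (v, d)
      | none =>
        let r1 := numberFactorGoA fuel (n - 1) d
        let r2 := numberFactorGoA fuel (n - 3) r1.2
        let r3 := numberFactorGoA fuel (n - 4) r2.2
        let d' := r3.2.insert n (r1.1 + r2.1 + r3.1)
        (d'.getD n 0, d')

def numberFactor (n : Int) (dp : List (Int × Int)) : Int :=
  (numberFactorGoA (n.toNat + 1) n (PySem.Dict.ofList dp)).1

-- ===== PORT B =====
def numberFactor_alt (n : Int) (dp : List (Int × Int)) : Int :=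
  let d := PySem.Dict.ofList dp
  if n = 0 ∨ n = 1 ∨ n = 2 then 1
  else if n = 3 then 2
  else if d.contains n then d.getD n 0
  else
    let st := (PySem.List.pyRange 4 (n + 1) 1).foldl
      (fun (st : List Int × PySem.Dict Int Int) i =>
        if st.2.contains i then (st.1.set i.toNat (st.2.getD i 0), st.2)
        else
          let v := PySem.List.pyGetD st.1 (i - 1) 0 + PySem.List.pyGetD st.1 (i - 3) 0
                     + PySem.List.pyGetD st.1 (i - 4) 0
          (st.1.set i.toNat v, st.2.insert i v))
      ([1, 1, 1, 2] ++ List.replicate (n - 3).toNat 0, d)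
    PySem.List.pyGetD st.1 n 0

-- ===== PRECONDITION & SPEC =====
-- Pre_ excludes n < 0 with n not a key of dp: there A recurses without end
-- (RecursionError), returning no value.
def Pre_numberFactor (n : Int) (dp : List (Int × Int)) : Prop :=
  0 ≤ n ∨ ((PySem.Dict.ofList dp).get? n).isSome = true
instance (n : Int) (dp : List (Int × Int)) : Decidable (Pre_numberFactor n dp) := by
  unfold Pre_numberFactor; infer_instance

def pvWitness_numberFactor : Int × (List (Int × Int)) := (10, [(5, 9)])

def Spec_numberFactor (n : Int) (dp : List (Int × Int)) (out : Int) : Prop := out = numberFactor_alt n dp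
instance (n : Int) (dp : List (Int × Int)) (out : Int) : Decidable (Spec_numberFactor n dp out) := by unfold Spec_numberFactor; infer_instance

-- ===== CLAIM (what is proved, stated in full; the proofs are below) =====
def Claim_equal_numberFactor : Prop := ∀ (n : Int) (dp : List (Int × Int)), Dom_numberFactor n dp → Pre_numberFactor n dp → Spec_numberFactor n dp (numberFactor n dp)

-- ===== LEMMAS AND PROOFS =====

-- the mathematical value both programs compute, relative to the initial dict d0
def Fm (d0 : PySem.Dict Int Int) (n : Int) : Int :=
  if n ≤ 2 then 1
  else if n = 3 then 2
  else
    match d0.get? n with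
    | some v => v
    | none => Fm d0 (n - 1) + Fm d0 (n - 3) + Fm d0 (n - 4)
termination_by n.toNat
decreasing_by all_goals (simp_wf; omega)

theorem Fm_of_some (d0 : PySem.Dict Int Int) {n v : Int} (h4 : 4 ≤ n)
    (h : d0.get? n = some v) : Fm d0 n = v := by
  rw [Fm]
  simp [show ¬ n ≤ 2 by omega, show n ≠ 3 by omega, h]

theorem Fm_of_none (d0 : PySem.Dict Int Int) {n : Int} (h4 : 4 ≤ n)
    (h : d0.get? n = none) : Fm d0 n = Fm d0 (n - 1) + Fm d0 (n - 3) + Fm d0 (n - 4) := by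
  rw [Fm]
  simp [show ¬ n ≤ 2 by omega, show n ≠ 3 by omega, h]

-- coherence of A's evolving memo dict with the initial dict d0
def CohA (d0 d : PySem.Dict Int Int) : Prop :=
  ∀ k : Int, d.get? k = d0.get? k ∨ (4 ≤ k ∧ d0.get? k = none ∧ d.get? k = some (Fm d0 k))

theorem goA_spec (d0 : PySem.Dict Int Int) :
    ∀ (fuel : Nat) (n : Int) (d : PySem.Dict Int Int), 0 ≤ n → n < fuel → CohA d0 d →
      (numberFactorGoA fuel n d).1 = Fm d0 n ∧ CohA d0 (numberFactorGoA fuel n d).2 := by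
  intro fuel
  induction fuel with
  | zero => intro n d h0 hlt _; exfalso; omega
  | succ fuel ih =>
    intro n d h0 hlt hcoh
    by_cases hb : n = 0 ∨ n = 1 ∨ n = 2
    · refine ⟨?_, ?_⟩ <;> simp only [numberFactorGoA, if_pos hb]
      · rw [Fm]; rcases hb with h | h | h <;> simp [h]
      · exact hcoh
    · by_cases h3 : n = 3
      · refine ⟨?_, ?_⟩ <;> simp only [numberFactorGoA, if_neg hb, if_pos h3]
        · subst h3; rw [Fm]; norm_num
        · exact hcoh
      · have h4 : 4 ≤ n := by simp only [not_or] at hb; omega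
        cases hget : d.get? n with
        | some v =>
          have hv : v = Fm d0 n := by
            rcases hcoh n with hc | ⟨_, _, hc⟩
            · rw [hget] at hc
              exact (Fm_of_some d0 h4 hc.symm).symm
            · rw [hget] at hc; exact (Option.some.injEq _ _ ▸ hc)
          refine ⟨?_, ?_⟩ <;> simp only [numberFactorGoA, if_neg hb, if_neg h3, hget]
          · exact hv
          · exact hcoh
        | none =>
          have hd0 : d0.get? n = none := by
            rcases hcoh n with hc | ⟨_, _, hc⟩
            · rw [hget] at hc; exact hc.symm
            · rw [hget] at hc; exact absurd hc (by simp)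
          obtain ⟨e1, c1⟩ := ih (n - 1) d (by omega) (by omega) hcoh
          obtain ⟨e2, c2⟩ := ih (n - 3) _ (by omega) (by omega) c1
          obtain ⟨e3, c3⟩ := ih (n - 4) _ (by omega) (by omega) c2
          have hsum : (numberFactorGoA fuel (n - 1) d).1
              + (numberFactorGoA fuel (n - 3) (numberFactorGoA fuel (n - 1) d).2).1
              + (numberFactorGoA fuel (n - 4) (numberFactorGoA fuel (n - 3) (numberFactorGoA fuel (n - 1) d).2).2).1
              = Fm d0 n := by
            rw [e1, e2, e3, ← Fm_of_none d0 h4 hd0]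
          refine ⟨?_, ?_⟩ <;> simp only [numberFactorGoA, if_neg hb, if_neg h3, hget]
          · rw [PySem.Dict.getD_insert_self, hsum]
          · intro k
            by_cases hk : k = n
            · subst hk
              exact Or.inr ⟨h4, hd0, by rw [PySem.Dict.get?_insert_self, hsum]⟩
            · rw [PySem.Dict.get?_insert_of_ne _ _ hk]
              exact c3 k

-- B's loop body, named for the proofs (definitionally the lambda in numberFactor_alt)
def stepB : (List Int × PySem.Dict Int Int) → Int → (List Int × PySem.Dict Int Int) :=
  fun st i =>
    if st.2.contains i then (st.1.set i.toNat (st.2.getD i 0), st.2)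
    else
      let v := PySem.List.pyGetD st.1 (i - 1) 0 + PySem.List.pyGetD st.1 (i - 3) 0
                 + PySem.List.pyGetD st.1 (i - 4) 0
      (st.1.set i.toNat v, st.2.insert i v)

def initB (d0 : PySem.Dict Int Int) (n : Int) : List Int × PySem.Dict Int Int :=
  ([1, 1, 1, 2] ++ List.replicate (n - 3).toNat 0, d0)

def InvB (d0 : PySem.Dict Int Int) (n b : Int) (st : List Int × PySem.Dict Int Int) : Prop :=
  st.1.length = (n + 1).toNat ∧
  (∀ j : Nat, (j : Int) < b → (j : Int) ≤ n → st.1.getD j 0 = Fm d0 j) ∧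
  (∀ k : Int, b ≤ k → st.2.get? k = d0.get? k)

theorem goB_spec (d0 : PySem.Dict Int Int) (n : Int) (hn : 4 ≤ n) :
    ∀ (b : Int) (hb : 4 ≤ b), b ≤ n + 1 →
      InvB d0 n b ((PySem.List.pyRange 4 b 1).foldl stepB (initB d0 n)) := by
  intro b hb
  induction b, hb using Int.le_induction with
  | base =>
    intro _
    rw [PySem.List.pyRange_one_eq_nil le_rfl]
    refine ⟨?_, ?_, fun _ _ => rfl⟩
    · simp [initB]; omega
    · intro j hj _
      have hj4 : j < 4 := by omega
      interval_cases j <;> (rw [Fm]; norm_num [initB, List.getD])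
  | succ b hb4 ihb =>
    intro hble
    obtain ⟨hlen, hvals, hdict⟩ := ihb (by omega)
    rw [PySem.List.pyRange_one_succ_right (by omega : (4:Int) ≤ b), List.foldl_append,
      List.foldl_cons, List.foldl_nil]
    set st := (PySem.List.pyRange 4 b 1).foldl stepB (initB d0 n) with hst
    have hbn : b ≤ n := by omega
    have hbtoNat : ((b.toNat : Int)) = b := by omega
    have hblt : b.toNat < st.1.length := by rw [hlen]; omega
    have hget_b : st.2.get? b = d0.get? b := hdict b le_rfl
    have hset_inv : ∀ w : Int, w = Fm d0 b →
        (∀ j : Nat, (j : Int) < b + 1 → (j : Int) ≤ n → (st.1.set b.toNat w).getD j 0 = Fm d0 j) := by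
      intro w hw j hj hjn
      by_cases hjb : j = b.toNat
      · subst hjb
        rw [List.getD, List.getElem?_set_self hblt]
        simpa [hbtoNat] using hw
      · rw [List.getD, List.getElem?_set_ne (Ne.symm hjb), ← List.getD]
        exact hvals j (by omega) hjn
    cases hd0b : d0.get? b with
    | some v =>
      have hcont : st.2.contains b = true := by
        rw [PySem.Dict.contains_eq_isSome_get?, hget_b, hd0b]; rfl
      refine ⟨?_, ?_, ?_⟩ <;> simp only [stepB, hcont, if_true]
      · simpa using hlen
      · exact hset_inv _ (by
          rw [PySem.Dict.getD_eq_get?_getD, hget_b, hd0b, Option.getD_some,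
            Fm_of_some d0 hb4 hd0b])
      · intro k hk; exact hdict k (by omega)
    | none =>
      have hcont : st.2.contains b = false := by
        rw [PySem.Dict.contains_eq_isSome_get?, hget_b, hd0b]; rfl
      have hrd : ∀ c : Int, 0 ≤ c → c < b → c ≤ n → PySem.List.pyGetD st.1 c 0 = Fm d0 c := by
        intro c hc0 hcb hcn
        rw [PySem.List.pyGetD_of_nonneg _ _ hc0]
        have := hvals c.toNat (by omega) (by omega)
        simpa [show ((c.toNat : Int)) = c by omega] using this
      have hv : PySem.List.pyGetD st.1 (b - 1) 0 + PySem.List.pyGetD st.1 (b - 3) 0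
          + PySem.List.pyGetD st.1 (b - 4) 0 = Fm d0 b := by
        rw [hrd (b - 1) (by omega) (by omega) (by omega),
          hrd (b - 3) (by omega) (by omega) (by omega),
          hrd (b - 4) (by omega) (by omega) (by omega),
          ← Fm_of_none d0 hb4 hd0b]
      refine ⟨?_, ?_, ?_⟩ <;> simp only [stepB, hcont, if_false, Bool.false_eq_true]
      · simpa using hlen
      · exact hset_inv _ hv
      · intro k hk
        rw [PySem.Dict.get?_insert_of_ne _ _ (by omega : k ≠ b)]
        exact hdict k (by omega)

-- ===== VERDICT (by name: the statement is the Claim_ definition above) =====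
theorem numberFactor_spec : Claim_equal_numberFactor := by
  intro n dp _ hpre
  unfold Spec_numberFactor numberFactor numberFactor_alt
  set d0 := PySem.Dict.ofList dp with hd0
  by_cases hb : n = 0 ∨ n = 1 ∨ n = 2
  · simp only [numberFactorGoA, if_pos hb]
  · by_cases h3 : n = 3
    · simp only [numberFactorGoA, if_neg hb, if_pos h3]
    · by_cases hn0 : 0 ≤ n
      · -- n ≥ 4
        have h4 : 4 ≤ n := by simp only [not_or] at hb; omega
        have hA : (numberFactorGoA (n.toNat + 1) n d0).1 = Fm d0 n :=
          (goA_spec d0 (n.toNat + 1) n d0 hn0 (by omega) (fun _ => Or.inl rfl)).1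
        rw [hA]
        simp only [if_neg hb, if_neg h3]
        cases hd : d0.get? n with
        | some v =>
          have hcont : d0.contains n = true := by
            rw [PySem.Dict.contains_eq_isSome_get?, hd]; rfl
          rw [if_pos hcont, PySem.Dict.getD_eq_get?_getD, hd, Option.getD_some,
            Fm_of_some d0 h4 hd]
        | none =>
          have hcont : d0.contains n = false := by
            rw [PySem.Dict.contains_eq_isSome_get?, hd]; rfl
          rw [if_neg (by simp [hcont])]
          obtain ⟨hlen, hvals, _⟩ := goB_spec d0 n h4 (n + 1) (by omega) le_rfl
          rw [show (fun (st : List Int × PySem.Dict Int Int) i =>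
                if st.2.contains i then (st.1.set i.toNat (st.2.getD i 0), st.2)
                else
                  let v := PySem.List.pyGetD st.1 (i - 1) 0 + PySem.List.pyGetD st.1 (i - 3) 0
                             + PySem.List.pyGetD st.1 (i - 4) 0
                  (st.1.set i.toNat v, st.2.insert i v)) = stepB from rfl,
            show ([(1:Int), 1, 1, 2] ++ List.replicate (n - 3).toNat 0, d0) = initB d0 n from rfl,
            PySem.List.pyGetD_of_nonneg _ _ (by omega : (0:Int) ≤ n)]
          have := hvals n.toNat (by omega) (by omega)
          simpa [show ((n.toNat : Int)) = n by omega] using this.symm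
      · -- n < 0 but n is a key of dp
        have hsome : (d0.get? n).isSome = true := by
          rcases hpre with h | h
          · omega
          · rw [hd0]; exact h
        obtain ⟨v, hv⟩ := Option.isSome_iff_exists.mp hsome
        have hfuel : n.toNat + 1 = 1 := by omega
        rw [hfuel]
        simp only [numberFactorGoA, if_neg hb, if_neg h3, hv]
        have hcont : d0.contains n = true := by
          rw [PySem.Dict.contains_eq_isSome_get?, hv]; rfl
        rw [if_pos hcont]
        show v = d0.getD n 0
        rw [PySem.Dict.getD_eq_get?_getD, hv, Option.getD_some]
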